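-- pv_equiv track=rewrite | github.com/mohanrajanr/Python-Leetcode | substringWithKUniqueCharacters.py | countkDist
-- ===== SOURCE A (Python) =====
-- def countkDist(str1, k):
--     # Initialize result
--     res = 0
--     # Consider all substrings beginning
--     # with str[i]
--     result = []
--     for i in range(0, len(str1)):
--         dist_count = 0
--
--         # Initializing array with 0
--         characters_table = {}
--
--         # Consider all substrings between str[i..j]
--         for j in range(i, len(str1)):
--
--             # If this is a new character for this
--             # substring, increment dist_count.
--             if str1[j] not in characters_table:
--                 characters_table[str1[j]] = 0
--                 dist_count += 1
--
--             # Increment count of current character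
--             characters_table[str1[j]] += 1
--
--             # If distinct character count becomes k,
--             # then increment result.
--             if (dist_count == k):
--                 res += 1
--                 result.append(str1[i:j+1])
--             if (dist_count > k):
--                 break
--
--     return res, result
-- ===== SOURCE B (Python) =====
-- def countkDist(str1, k):
--     n = len(str1)
--     result = [str1[i:j + 1]
--               for i in range(n)
--               for j in range(i, n)
--               if len(set(str1[i:j + 1])) == k]
--     return len(result), result
-- ===== Notes on version B (the rewrite author's own statement) =====
-- stated objective: simpler
-- what changed: Replaced A's incremental per-start frequency dict, distinct counter and early break by one nested comprehension that tests len(set(str1[i:j+1])) == k directly for every i <= j and returns the list with its length.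
import Mathlib
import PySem

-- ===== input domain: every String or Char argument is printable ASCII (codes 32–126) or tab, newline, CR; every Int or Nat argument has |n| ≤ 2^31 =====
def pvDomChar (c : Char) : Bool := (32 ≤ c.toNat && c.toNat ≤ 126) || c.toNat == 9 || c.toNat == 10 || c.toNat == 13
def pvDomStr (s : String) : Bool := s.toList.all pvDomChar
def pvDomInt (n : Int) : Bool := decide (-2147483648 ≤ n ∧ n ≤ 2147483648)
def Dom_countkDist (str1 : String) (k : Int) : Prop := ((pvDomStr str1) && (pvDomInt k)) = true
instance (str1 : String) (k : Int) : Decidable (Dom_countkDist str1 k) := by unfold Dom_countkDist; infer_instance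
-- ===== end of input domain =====

-- B replaces A's incremental per-start frequency dict, distinct counter and early break by a
-- direct nested comprehension testing len(set(slice)) per substring (objective: simpler; not faster).

-- ===== PORT A =====
-- inner 'for j in range(i, len(str1))' loop with early break, state (dist_count, characters_table, res, result)
def countkDistInner (str1 : String) (k : Int) (i : Int) :
    List Int → Int → PySem.Dict Char Int → Int → List String → Int × List String
  | [], _dc, _table, res, result => (res, result)
  | j :: js, dc, table, res, result =>
    let c := (PySem.Str.pyGet? str1 j).getD ' '   -- str1[j]; j is always in range here
    let p := if table.contains c then (dc, table) else (dc + 1, table.insert c 0)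
    let table' := p.2.modify c 0 (· + 1)          -- characters_table[str1[j]] += 1
    let q := if p.1 = k then
        (res + 1, result ++ [PySem.Str.slice str1 (some i) (some (j + 1))])
      else (res, result)
    if p.1 > k then (q.1, q.2)                    -- break
    else countkDistInner str1 k i js p.1 table' q.1 q.2

def countkDist (str1 : String) (k : Int) : Int × List String :=
  let n := PySem.Str.len str1
  (PySem.List.pyRange 0 n 1).foldl
    (fun st i => countkDistInner str1 k i (PySem.List.pyRange i n 1) 0 PySem.Dict.empty st.1 st.2)
    (0, [])

-- ===== PORT B =====
def countkDist_alt (str1 : String) (k : Int) : Int × List String :=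
  let n := PySem.Str.len str1
  let result := (PySem.List.pyRange 0 n 1).flatMap (fun i =>
    (PySem.List.pyRange i n 1).filterMap (fun j =>
      if ((PySem.Set.ofList (PySem.Str.slice str1 (some i) (some (j + 1))).toList).length : Int) = k
      then some (PySem.Str.slice str1 (some i) (some (j + 1))) else none))
  ((result.length : Int), result)

-- ===== PRECONDITION & SPEC =====
def Spec_countkDist (str1 : String) (k : Int) (out : Int × List String) : Prop := out = countkDist_alt str1 k
instance (str1 : String) (k : Int) (out : Int × List String) : Decidable (Spec_countkDist str1 k out) := by unfold Spec_countkDist; infer_instance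

-- ===== CLAIM (what is proved, stated in full; the proofs are below) =====
def Claim_equal_countkDist : Prop := ∀ (str1 : String) (k : Int), Dom_countkDist str1 k → Spec_countkDist str1 k (countkDist str1 k)

-- ===== LEMMAS AND PROOFS =====

-- segment str1[i:j] as a char list
def segN (l : List Char) (i j : Nat) : List Char := (l.drop i).take (j - i)

-- number of distinct chars, as Python's len(set(·))
def distLen (xs : List Char) : Int := ((PySem.Set.ofList xs).length : Int)

-- B's inner list for start i, from j on
def Bf (str1 : String) (k : Int) (i : Int) (j : Int) : List String :=
  (PySem.List.pyRange j (PySem.Str.len str1) 1).filterMap (fun jj =>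
    if ((PySem.Set.ofList (PySem.Str.slice str1 (some i) (some (jj + 1))).toList).length : Int) = k
    then some (PySem.Str.slice str1 (some i) (some (jj + 1))) else none)

lemma ofList_append_singleton (xs : List Char) (c : Char) :
    PySem.Set.ofList (xs ++ [c]) = PySem.Set.add (PySem.Set.ofList xs) c := by
  simp [PySem.Set.ofList_eq_foldl]

lemma distLen_append_mem {xs : List Char} {c : Char} (h : c ∈ xs) :
    distLen (xs ++ [c]) = distLen xs := by
  unfold distLen
  rw [ofList_append_singleton]
  simp [PySem.Set.add, PySem.Set.contains, PySem.Set.mem_ofList, h]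

lemma distLen_append_not_mem {xs : List Char} {c : Char} (h : c ∉ xs) :
    distLen (xs ++ [c]) = distLen xs + 1 := by
  unfold distLen
  rw [ofList_append_singleton]
  simp [PySem.Set.add, PySem.Set.contains, PySem.Set.mem_ofList, h]

lemma distLen_mono (xs ys : List Char) : distLen xs ≤ distLen (xs ++ ys) := by
  unfold distLen
  rw [PySem.Set.ofList_eq_foldl, PySem.Set.ofList_eq_foldl, List.foldl_append]
  have : ∀ (ys : List Char) (s : List Char), s.length ≤ (ys.foldl PySem.Set.add s).length := by
    intro ys
    induction ys with
    | nil => intro s; simp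
    | cons y ys ih =>
      intro s
      refine le_trans ?_ (ih (PySem.Set.add s y))
      by_cases h : y ∈ s <;> simp [PySem.Set.add, PySem.Set.contains, h]
  exact_mod_cast this ys _

lemma segN_succ {l : List Char} {i j : Nat} (hij : i ≤ j) (hj : j < l.length) :
    segN l i (j + 1) = segN l i j ++ [l[j]] := by
  unfold segN
  have h1 : j + 1 - i = (j - i) + 1 := by omega
  rw [h1, List.take_add_one]
  have h2 : (l.drop i)[j - i]? = some l[j] := by
    rw [List.getElem?_drop]
    have : i + (j - i) = j := by omega
    rw [this, List.getElem?_eq_getElem hj]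
  rw [h2]
  rfl

lemma segN_split {l : List Char} {i j j' : Nat} (hij : i ≤ j) (hjj : j ≤ j') :
    ∃ t, segN l i j' = segN l i j ++ t := by
  refine ⟨((l.drop i).drop (j - i)).take (j' - j), ?_⟩
  unfold segN
  have h1 : j' - i = (j - i) + (j' - j) := by omega
  rw [h1, List.take_add]

lemma slice_toList (str1 : String) (i j : Nat) :
    (PySem.Str.slice str1 (some (i : Int)) (some ((j : Int) + 1))).toList
      = segN str1.toList i (j + 1) := by
  rw [PySem.Str.toList_slice, PySem.Chars.slice_eq_listSlice]
  have h1 : ((j : Int) + 1) = ((j + 1 : Nat) : Int) := by push_cast; ring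
  rw [h1, PySem.List.slice_natCast]
  rfl

-- B's tail is empty once the distinct count has exceeded k
lemma Bf_nil (str1 : String) (k : Int) (i j : Nat) (hij : i ≤ j)
    (hk : k < distLen (segN str1.toList i j)) :
    Bf str1 k (i : Int) (j : Int) = [] := by

  unfold Bf
  rw [List.filterMap_eq_nil_iff]
  intro jj hjj
  rw [PySem.Str.len_eq, PySem.List.mem_pyRange_one] at hjj
  obtain ⟨h1, h2⟩ := hjj
  have hjj0 : (0:Int) ≤ jj := le_trans (Int.natCast_nonneg j) h1
  have hjje : jj = ((jj.toNat : Nat) : Int) := by omega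
  rw [if_neg]
  rw [hjje, slice_toList]
  obtain ⟨t, ht⟩ := segN_split (l := str1.toList) (hij := hij) (hjj := (by omega : j ≤ jj.toNat + 1))
  have hmono := distLen_mono (segN str1.toList i j) t
  rw [← ht] at hmono
  intro hc
  simp only [distLen] at hk hmono
  omega

lemma Bf_peel (str1 : String) (k : Int) (i j : Nat) (hj : j < str1.toList.length) :
    Bf str1 k (i : Int) (j : Int)
      = (if distLen (segN str1.toList i (j + 1)) = k
          then [PySem.Str.slice str1 (some (i : Int)) (some ((j : Int) + 1))] else [])
        ++ Bf str1 k (i : Int) ((j : Int) + 1) := by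

  unfold Bf
  rw [PySem.Str.len_eq]
  rw [PySem.List.pyRange_one_cons (by exact_mod_cast hj)]
  rw [List.filterMap_cons]
  rw [slice_toList str1 i j]
  simp only [distLen]
  split_ifs with hc
  · simp
  · simp

lemma innerA_eq (str1 : String) (k : Int) (i : Nat) :
    ∀ (d j : Nat), str1.toList.length - j = d → i ≤ j → j ≤ str1.toList.length →
    ∀ (table : PySem.Dict Char Int) (res : Int) (result : List String),
    (∀ c, table.contains c = decide (c ∈ segN str1.toList i j)) →
    countkDistInner str1 k (i : Int) (PySem.List.pyRange (j : Int) (str1.toList.length : Int) 1)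
        (distLen (segN str1.toList i j)) table res result
      = (res + ((Bf str1 k (i : Int) (j : Int)).length : Int),
         result ++ Bf str1 k (i : Int) (j : Int)) := by
  intro d
  induction d with
  | zero =>
    intro j h0 hij hjL table res result hT
    have hj : j = str1.toList.length := by omega
    subst hj
    rw [PySem.List.pyRange_one_eq_nil le_rfl]
    unfold Bf
    rw [PySem.Str.len_eq, PySem.List.pyRange_one_eq_nil le_rfl]
    simp [countkDistInner]
  | succ d ih =>
    intro j h0 hij hjL table res result hT
    have hjL' : j < str1.toList.length := by omega
    rw [PySem.List.pyRange_one_cons (by exact_mod_cast hjL')]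
    have hc : (PySem.Str.pyGet? str1 (j : Int)).getD ' ' = str1.toList[j] := by
      simp [List.getElem?_eq_getElem hjL']
    simp only [countkDistInner, hc, hT]
    have hseg := segN_succ hij hjL'
    by_cases hm : str1.toList[j] ∈ segN str1.toList i j
    · have hd1 : distLen (segN str1.toList i (j + 1)) = distLen (segN str1.toList i j) := by
        rw [hseg]; exact distLen_append_mem hm
      simp only [hm, decide_true, if_true]
      rw [← hd1]
      have hT' : ∀ c, ((table.modify str1.toList[j] 0 fun x => x + 1)).contains c
          = decide (c ∈ segN str1.toList i (j + 1)) := by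
        intro c
        rw [PySem.Dict.contains_modify, hT, hseg]
        by_cases hcc : c = str1.toList[j] <;> simp [hcc, Bool.or_comm, List.mem_append]
      have hcast : ((j + 1 : Nat) : Int) = (j : Int) + 1 := by push_cast; ring
      rw [Bf_peel str1 k i j hjL']
      by_cases hgt : distLen (segN str1.toList i (j + 1)) > k
      · rw [if_pos hgt]
        have hne : ¬ distLen (segN str1.toList i (j + 1)) = k := by omega
        have hnil : Bf str1 k (i : Int) ((j : Int) + 1) = [] := by
          rw [← hcast]
          exact Bf_nil str1 k i (j + 1) (by omega) hgt
        rw [hnil]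
        simp [hne]
      · rw [if_neg hgt]
        set q := (if distLen (segN str1.toList i (j + 1)) = k then
            (res + 1, result ++ [PySem.Str.slice str1 (some (i : Int)) (some ((j : Int) + 1))])
          else (res, result)) with hq
        have hrec := ih (j + 1) (by omega) (by omega) (by omega) _ q.1 q.2 hT'
        rw [hcast] at hrec
        rw [hrec]
        by_cases heq : distLen (segN str1.toList i (j + 1)) = k
        · rw [hq, if_pos heq]
          rw [if_pos heq]
          simp only [Prod.mk.injEq, List.length_append, List.length_cons]
          constructor
          · push_cast; simp; ring
          · simp
        · rw [hq, if_neg heq]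
          simp [heq]
    · have hd1 : distLen (segN str1.toList i (j + 1)) = distLen (segN str1.toList i j) + 1 := by
        rw [hseg]; exact distLen_append_not_mem hm
      simp only [hm, decide_false, Bool.false_eq_true, if_false]
      rw [← hd1]
      have hT' : ∀ c, (((table.insert str1.toList[j] 0).modify str1.toList[j] 0 fun x => x + 1)).contains c
          = decide (c ∈ segN str1.toList i (j + 1)) := by
        intro c
        rw [PySem.Dict.contains_modify, PySem.Dict.contains_insert, hT, hseg]
        by_cases hcc : c = str1.toList[j]
        · simp [hcc, List.mem_append]
        · have hb : (c == str1.toList[j]) = false := beq_eq_false_iff_ne.mpr hcc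
          simp [hb, hcc, List.mem_append]
      have hcast : ((j + 1 : Nat) : Int) = (j : Int) + 1 := by push_cast; ring
      rw [Bf_peel str1 k i j hjL']
      by_cases hgt : distLen (segN str1.toList i (j + 1)) > k
      · rw [if_pos hgt]
        have hne : ¬ distLen (segN str1.toList i (j + 1)) = k := by omega
        have hnil : Bf str1 k (i : Int) ((j : Int) + 1) = [] := by
          rw [← hcast]
          exact Bf_nil str1 k i (j + 1) (by omega) hgt
        rw [hnil]
        simp [hne]
      · rw [if_neg hgt]
        set q := (if distLen (segN str1.toList i (j + 1)) = k then
            (res + 1, result ++ [PySem.Str.slice str1 (some (i : Int)) (some ((j : Int) + 1))])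
          else (res, result)) with hq
        have hrec := ih (j + 1) (by omega) (by omega) (by omega) _ q.1 q.2 hT'
        rw [hcast] at hrec
        rw [hrec]
        by_cases heq : distLen (segN str1.toList i (j + 1)) = k
        · rw [hq, if_pos heq]
          rw [if_pos heq]
          simp only [Prod.mk.injEq, List.length_append, List.length_cons]
          constructor
          · push_cast; simp; ring
          · simp
        · rw [hq, if_neg heq]
          simp [heq]

lemma outer_eq (str1 : String) (k : Int) :
    ∀ (is : List Int), (∀ x ∈ is, 0 ≤ x ∧ x ≤ (str1.toList.length : Int)) →
    ∀ (res : Int) (result : List String),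
    is.foldl (fun st i => countkDistInner str1 k i
        (PySem.List.pyRange i (str1.toList.length : Int) 1) 0 PySem.Dict.empty st.1 st.2)
        (res, result)
      = (res + ((is.flatMap (fun i => Bf str1 k i i)).length : Int),
         result ++ is.flatMap (fun i => Bf str1 k i i)) := by
  intro is
  induction is with
  | nil => intro _ res result; simp
  | cons a as ih =>
    intro h res result
    obtain ⟨ha, has⟩ := h a (by simp)
    have hA : a = ((a.toNat : Nat) : Int) := by omega
    simp only [List.foldl_cons]
    have h1 := innerA_eq str1 k a.toNat (str1.toList.length - a.toNat) a.toNat rfl le_rfl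
      (by omega) PySem.Dict.empty res result
      (by intro c; simp [segN, PySem.Dict.contains_empty])
    have hdc : distLen (segN str1.toList a.toNat a.toNat) = 0 := by
      simp [segN, distLen, PySem.Set.ofList_eq_foldl]
    rw [hdc] at h1
    rw [← hA] at h1
    rw [h1]
    rw [ih (by intro x hx; exact h x (by simp [hx])) _ _]
    simp only [List.flatMap_cons, List.length_append, Prod.mk.injEq]
    constructor
    · push_cast; ring
    · simp

-- ===== VERDICT (by name: the statement is the Claim_ definition above) =====
theorem countkDist_spec : Claim_equal_countkDist := by
  unfold Claim_equal_countkDist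
  intro str1 k _hdom
  unfold Spec_countkDist
  show countkDist str1 k = countkDist_alt str1 k
  simp only [countkDist, countkDist_alt, PySem.Str.len_eq]
  rw [outer_eq str1 k _ ?hb 0 []]
  case hb =>
    intro x hx
    rw [PySem.List.mem_pyRange_one] at hx
    exact ⟨hx.1, le_of_lt hx.2⟩
  simp [Bf, PySem.Str.len_eq]
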